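-- pv_equiv track=rewrite | github.com/dev641/pdfOps | common/utils/utils.py | distribute_k
-- ===== SOURCE A (Python) =====
-- def distribute_k(lst: list, k: int) -> list[float]:
--     # Step 1: Extract (index, value) pairs for values >= 2
--     eligible_indices = [(i, lst[i]) for i in range(len(lst)) if lst[i] >= 2]
--
--     # Step 2: Sort by value in descending order (keeping original indices)
--     eligible_indices.sort(key=lambda x: x[1], reverse=True)
--
--     # Step 3: Distribute k iteratively
--     eligible_indices = [i for i, _ in eligible_indices]  # Extract indices only
--
--     while k > 0 and eligible_indices:
--         for i in eligible_indices:
--             if k > 0: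
--                 lst[i] -= 1  # Reduce the value at the original index
--                 k -= 1
--             else:
--                 break  # Stop if k is exhausted
--
--     return lst
-- ===== SOURCE B (Python) =====
-- def distribute_k(lst: list, k: int) -> list[float]:
--     # Same in-place mutation of lst as the original, computed in closed form.
--     pairs = [(i, v) for i, v in enumerate(lst) if v >= 2]
--     pairs.sort(key=lambda x: x[1], reverse=True)
--     m = len(pairs)
--     if k > 0 and m > 0:
--         q, r = divmod(k, m)
--         for pos, (i, _) in enumerate(pairs):
--             lst[i] -= q + (1 if pos < r else 0)
--     return lst
-- ===== Notes on version B (the rewrite author's own statement) =====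
-- stated objective: alternative
-- what changed: The round-robin while-loop that hands out k unit decrements one at a time is replaced by a single divmod(k, m): each eligible index gets its whole decrement q (+1 for the first r positions in sorted order) in one pass.
import Mathlib
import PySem

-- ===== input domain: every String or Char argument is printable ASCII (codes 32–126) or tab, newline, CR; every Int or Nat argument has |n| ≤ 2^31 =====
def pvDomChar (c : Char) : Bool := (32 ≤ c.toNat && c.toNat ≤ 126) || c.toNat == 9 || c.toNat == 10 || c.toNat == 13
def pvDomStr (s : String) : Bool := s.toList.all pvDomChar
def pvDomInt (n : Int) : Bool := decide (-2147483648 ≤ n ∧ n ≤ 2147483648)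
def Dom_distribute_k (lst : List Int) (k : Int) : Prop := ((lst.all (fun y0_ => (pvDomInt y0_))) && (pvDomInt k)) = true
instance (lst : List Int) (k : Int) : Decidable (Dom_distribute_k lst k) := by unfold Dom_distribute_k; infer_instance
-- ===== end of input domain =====

-- B replaces A's one-decrement-at-a-time round-robin loop by a single divmod(k, m) pass;
-- equivalence is about the returned list (both Pythons mutate `lst` in place to the same final state).

-- ===== PORT A =====
-- lst[i] -= 1  (i is always a valid non-negative index here)
def pvDecAt (lst : List Int) (i : Int) : List Int :=
  PySem.List.pySetD lst i (PySem.List.pyGetD lst i 0 - 1)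

-- the inner 'for i in eligible_indices: if k > 0: lst[i] -= 1; k -= 1 else: break'
def pvPassA (lst : List Int) (elig : List Int) (k : Int) : List Int × Int :=
  match elig with
  | [] => (lst, k)
  | i :: rest => if 0 < k then pvPassA (pvDecAt lst i) rest (k - 1) else (lst, k)

-- the fuel left after one pass (used for the while-loop's termination)
theorem pvPassA_snd (lst : List Int) (elig : List Int) (k : Int) (h : 0 ≤ k) :
    (pvPassA lst elig k).2 = max (k - (elig.length : Int)) 0 := by
  induction elig generalizing lst k with
  | nil => simp [pvPassA]; omega
  | cons i rest ih =>
    by_cases hk : 0 < k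
    · rw [pvPassA, if_pos hk, ih _ _ (by omega)]
      simp; omega
    · rw [pvPassA, if_neg hk]
      simp; omega

-- 'while k > 0 and eligible_indices:'
def pvLoopA (lst : List Int) (elig : List Int) (k : Int) : List Int :=
  if h : 0 < k ∧ elig ≠ [] then
    pvLoopA (pvPassA lst elig k).1 elig (pvPassA lst elig k).2
  else lst
termination_by k.toNat
decreasing_by
  have hs := pvPassA_snd lst elig k (le_of_lt h.1)
  have hl : 0 < elig.length := List.length_pos_iff.mpr h.2
  omega

def distribute_k (lst : List Int) (k : Int) : List Int :=
  let eligible := (PySem.List.pyRange 0 (lst.length : Int) 1).filterMap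
    (fun i => if 2 ≤ PySem.List.pyGetD lst i 0 then some (i, PySem.List.pyGetD lst i 0) else none)
  let sortedPairs := PySem.List.sorted eligible (fun x => x.2) true
  let idxs := sortedPairs.map (fun p => p.1)
  pvLoopA lst idxs k

-- ===== PORT B =====
def distribute_k_alt (lst : List Int) (k : Int) : List Int :=
  let pairs := (PySem.List.enumerate lst 0).filter (fun p => decide (2 ≤ p.2))
  let spairs := PySem.List.sorted pairs (fun x => x.2) true
  if 0 < k ∧ 0 < spairs.length then
    let q := PySem.Int.floordiv k (spairs.length : Int)
    let r := PySem.Int.mod k (spairs.length : Int)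
    (PySem.List.enumerate spairs 0).foldl
      (fun acc p => PySem.List.pySetD acc p.2.1
        (PySem.List.pyGetD acc p.2.1 0 - (q + if p.1 < r then 1 else 0))) lst
  else lst

-- ===== PRECONDITION & SPEC =====
def Spec_distribute_k (lst : List Int) (k : Int) (out : List Int) : Prop := out = distribute_k_alt lst k
instance (lst : List Int) (k : Int) (out : List Int) : Decidable (Spec_distribute_k lst k out) := by unfold Spec_distribute_k; infer_instance

-- ===== CLAIM (what is proved, stated in full; the proofs are below) =====
def Claim_equal_distribute_k : Prop := ∀ (lst : List Int) (k : Int), Dom_distribute_k lst k → Spec_distribute_k lst k (distribute_k lst k)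

-- ===== LEMMAS AND PROOFS =====

-- decrement lst[i] by a (total: a no-op off-range, like pySetD)
def pvDecBy (lst : List Int) (i : Int) (a : Int) : List Int :=
  PySem.List.pySetD lst i (PySem.List.pyGetD lst i 0 - a)

-- decrement idxs[0] by q+1 if 0<r, by q otherwise, counting r down along the list
def pvApplyQR (lst : List Int) (idxs : List Int) (q r : Int) : List Int :=
  match idxs with
  | [] => lst
  | i :: t => pvApplyQR (pvDecBy lst i (q + if 0 < r then 1 else 0)) t q (r - 1)

theorem getElem?_pvDecBy (lst : List Int) (i a : Int) (m : Nat) (hi : 0 ≤ i) :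
    (pvDecBy lst i a)[m]? = if m = i.toNat then lst[m]?.map (· - a) else lst[m]? := by
  unfold pvDecBy
  rw [PySem.List.pySetD_of_nonneg _ _ hi, List.getElem?_set]
  split_ifs with h1 h2 h3 <;> try (first | rfl | omega)
  · subst h1
    simp [PySem.List.pyGetD, PySem.List.pyGet?_of_nonneg (xs := lst) hi,
      List.getElem?_eq_getElem h2]
  · subst h1
    rw [List.getElem?_eq_none (by omega)]; rfl

theorem pvDecBy_zero (lst : List Int) (i : Int) (h : 0 ≤ i) : pvDecBy lst i 0 = lst := by
  apply List.ext_getElem? ; intro m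
  rw [getElem?_pvDecBy _ _ _ _ h]
  split_ifs <;> simp

theorem pvDecBy_add (lst : List Int) (i : Int) (a b : Int) (h : 0 ≤ i) :
    pvDecBy (pvDecBy lst i a) i b = pvDecBy lst i (a + b) := by
  apply List.ext_getElem? ; intro m
  rw [getElem?_pvDecBy _ _ _ _ h, getElem?_pvDecBy _ _ _ _ h, getElem?_pvDecBy _ _ _ _ h]
  split_ifs with h1 <;> [skip; rfl]
  cases lst[m]? <;> simp <;> ring

theorem pvDecBy_comm (lst : List Int) (i j : Int) (a b : Int) (hi : 0 ≤ i) (hj : 0 ≤ j) :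
    pvDecBy (pvDecBy lst i a) j b = pvDecBy (pvDecBy lst j b) i a := by
  apply List.ext_getElem? ; intro m
  rw [getElem?_pvDecBy _ _ _ _ hj, getElem?_pvDecBy _ _ _ _ hi,
      getElem?_pvDecBy _ _ _ _ hi, getElem?_pvDecBy _ _ _ _ hj]
  split_ifs <;> try rfl
  cases lst[m]? <;> simp <;> ring

theorem pvApplyQR_decBy (idxs : List Int) (lst : List Int) (j : Int) (b q r : Int)
    (hall : ∀ i ∈ idxs, 0 ≤ i) (hj : 0 ≤ j) :
    pvDecBy (pvApplyQR lst idxs q r) j b = pvApplyQR (pvDecBy lst j b) idxs q r := by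
  induction idxs generalizing lst r with
  | nil => rfl
  | cons i t ih =>
    rw [pvApplyQR, pvApplyQR, ih _ _ (fun x hx => hall x (List.mem_cons_of_mem _ hx)),
        pvDecBy_comm _ _ _ _ _ (hall i List.mem_cons_self) hj]

theorem pvApplyQR_r_nonpos (idxs : List Int) (lst : List Int) (q r r' : Int)
    (hr : r ≤ 0) (hr' : r' ≤ 0) :
    pvApplyQR lst idxs q r = pvApplyQR lst idxs q r' := by
  induction idxs generalizing lst r r' with
  | nil => rfl
  | cons i t ih =>
    rw [pvApplyQR, pvApplyQR, if_neg (by omega), if_neg (by omega)]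
    exact ih _ _ _ (by omega) (by omega)

theorem pvApplyQR_zero (idxs : List Int) (lst : List Int) (r : Int)
    (hall : ∀ i ∈ idxs, 0 ≤ i) (hr : r ≤ 0) :
    pvApplyQR lst idxs 0 r = lst := by
  induction idxs generalizing lst r with
  | nil => rfl
  | cons i t ih =>
    rw [pvApplyQR, if_neg (by omega), add_zero, pvDecBy_zero _ _ (hall i List.mem_cons_self)]
    exact ih _ _ (fun x hx => hall x (List.mem_cons_of_mem _ hx)) (by omega)

theorem pvApplyQR_succ (idxs : List Int) (lst : List Int) (q r : Int)
    (hall : ∀ i ∈ idxs, 0 ≤ i) :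
    pvApplyQR (pvApplyQR lst idxs 1 0) idxs q r = pvApplyQR lst idxs (q + 1) r := by
  induction idxs generalizing lst r with
  | nil => rfl
  | cons i t ih =>
    have hi : 0 ≤ i := hall i List.mem_cons_self
    have ht : ∀ x ∈ t, 0 ≤ x := fun x hx => hall x (List.mem_cons_of_mem _ hx)
    have hcons : ∀ (L : List Int) (q' r' : Int), pvApplyQR L (i :: t) q' r'
        = pvApplyQR (pvDecBy L i (q' + if 0 < r' then 1 else 0)) t q' (r' - 1) :=
      fun _ _ _ => rfl
    simp only [hcons]
    rw [if_neg (by omega), add_zero,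
        pvApplyQR_r_nonpos t (pvDecBy lst i 1) 1 (0 - 1) 0 (by omega) (by omega),
        pvApplyQR_decBy t (pvDecBy lst i 1) i _ 1 0 ht hi,
        pvDecBy_add _ _ _ _ hi, ih _ _ ht]
    congr 2
    split_ifs <;> ring

theorem pvPassA_le (idxs : List Int) (lst : List Int) (k : Int)
    (h0 : 0 ≤ k) (hk : k ≤ (idxs.length : Int)) (hall : ∀ i ∈ idxs, 0 ≤ i) :
    (pvPassA lst idxs k).1 = pvApplyQR lst idxs 0 k := by
  induction idxs generalizing lst k with
  | nil =>
    simp only [pvPassA, pvApplyQR]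
  | cons i t ih =>
    have hi : 0 ≤ i := hall i List.mem_cons_self
    have ht : ∀ x ∈ t, 0 ≤ x := fun x hx => hall x (List.mem_cons_of_mem _ hx)
    by_cases hkp : 0 < k
    · rw [pvPassA, if_pos hkp, pvApplyQR, if_pos hkp, show pvDecBy lst i (0 + 1) = pvDecAt lst i by
        unfold pvDecBy pvDecAt; norm_num]
      exact ih _ _ (by omega) (by simpa using hk) ht
    · have hk0 : k = 0 := by omega
      rw [pvPassA, if_neg hkp, hk0]
      exact (pvApplyQR_zero (i :: t) lst 0 hall (by omega)).symm

theorem pvPassA_ge (idxs : List Int) (lst : List Int) (k : Int)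
    (hk : (idxs.length : Int) ≤ k) (hall : ∀ i ∈ idxs, 0 ≤ i) :
    pvPassA lst idxs k = (pvApplyQR lst idxs 1 0, k - (idxs.length : Int)) := by
  induction idxs generalizing lst k with
  | nil => simp [pvPassA, pvApplyQR]
  | cons i t ih =>
    have hi : 0 ≤ i := hall i List.mem_cons_self
    have ht : ∀ x ∈ t, 0 ≤ x := fun x hx => hall x (List.mem_cons_of_mem _ hx)
    have hlen : ((i :: t).length : Int) = (t.length : Int) + 1 := by simp
    rw [pvPassA, if_pos (by omega), pvApplyQR, if_neg (by omega), add_zero,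
        show pvDecBy lst i 1 = pvDecAt lst i from rfl,
        ih _ _ (by omega) ht, pvApplyQR_r_nonpos t _ 1 0 (0 - 1) (by omega) (by omega)]
    rw [Prod.mk.injEq]
    exact ⟨rfl, by push_cast [List.length_cons]; ring⟩

theorem pvLoopA_eq (n : Nat) (k : Int) (lst idxs : List Int)
    (hn : k.toNat = n) (h0 : 0 ≤ k) (hne : idxs ≠ [])
    (hall : ∀ i ∈ idxs, 0 ≤ i) :
    pvLoopA lst idxs k =
      pvApplyQR lst idxs (PySem.Int.floordiv k (idxs.length : Int))
        (PySem.Int.mod k (idxs.length : Int)) := by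
  induction n using Nat.strong_induction_on generalizing k lst with
  | _ n ih =>
  have hm : 0 < (idxs.length : Int) := by
    have := List.length_pos_iff.mpr hne; omega
  rw [PySem.Int.floordiv_eq_ediv_of_pos hm, PySem.Int.mod_eq_emod_of_pos hm]
  by_cases hk : 0 < k
  · by_cases hcase : k < (idxs.length : Int)
    · -- partial pass: q = 0, r = k, fuel drops to 0
      have hq : k / (idxs.length : Int) = 0 := Int.ediv_eq_zero_of_lt h0 hcase
      have hr : k % (idxs.length : Int) = k := Int.emod_eq_of_lt h0 hcase
      rw [pvLoopA, dif_pos ⟨hk, hne⟩, pvPassA_snd _ _ _ h0,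
          show max (k - (idxs.length : Int)) 0 = 0 by omega,
          pvLoopA, dif_neg (by simp), pvPassA_le idxs lst k h0 (by omega) hall, hq, hr]
    · -- full pass: recurse with k - m
      rw [pvLoopA, dif_pos ⟨hk, hne⟩, pvPassA_ge idxs lst k (by omega) hall]
      have hrec := ih (k - (idxs.length : Int)).toNat (by omega) (k - (idxs.length : Int)) (pvApplyQR lst idxs 1 0) rfl (by omega)
      rw [PySem.Int.floordiv_eq_ediv_of_pos hm, PySem.Int.mod_eq_emod_of_pos hm] at hrec
      have hdiv : (k - (idxs.length : Int)) / (idxs.length : Int)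
          = k / (idxs.length : Int) - 1 := by
        rw [show k - (idxs.length : Int) = k + (-1) * (idxs.length : Int) by ring,
            Int.add_mul_ediv_right _ _ (by omega)]
        ring
      have hmod : (k - (idxs.length : Int)) % (idxs.length : Int)
          = k % (idxs.length : Int) := by
        rw [show k - (idxs.length : Int) = k + (-1) * (idxs.length : Int) by ring,
            Int.add_mul_emod_self_right]
      rw [hrec, hdiv, hmod, pvApplyQR_succ idxs _ _ _ hall]
      congr 1
      omega
  · have hk0 : k = 0 := by omega
    subst hk0
    rw [pvLoopA, dif_neg (by simp)]
    simp only [Int.zero_ediv, Int.zero_emod]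
    exact (pvApplyQR_zero idxs lst 0 hall (by omega)).symm

-- B's enumerate-fold is pvApplyQR on the first components
theorem pvBfold (pairs : List (Int × Int)) (s : Int) (lst : List Int) (q r : Int) :
    (PySem.List.enumerate pairs s).foldl
      (fun acc p => PySem.List.pySetD acc p.2.1
        (PySem.List.pyGetD acc p.2.1 0 - (q + if p.1 < r then 1 else 0))) lst
      = pvApplyQR lst (pairs.map (fun p => p.1)) q (r - s) := by
  induction pairs generalizing s lst with
  | nil => rfl
  | cons p t ih =>
    rw [PySem.List.enumerate_cons, List.foldl_cons, List.map_cons, pvApplyQR, ih]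
    have h1 : (if s < r then (1:Int) else 0) = (if 0 < r - s then 1 else 0) := by
      split_ifs <;> omega
    have h2 : r - (s + 1) = r - s - 1 := by ring
    rw [h2]
    congr 1
    simp only [pvDecBy]
    rw [h1]

-- A's range comprehension builds the same pair list as B's enumerate filter
theorem pvElig_eq (lst : List Int) :
    (PySem.List.pyRange 0 (lst.length : Int) 1).filterMap
      (fun i => if 2 ≤ PySem.List.pyGetD lst i 0 then some (i, PySem.List.pyGetD lst i 0) else none)
    = (PySem.List.enumerate lst 0).filter (fun p => decide (2 ≤ p.2)) := by
  rw [PySem.List.enumerate_eq_map_pyRange lst 0, PySem.List.len_eq]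
  generalize PySem.List.pyRange 0 (lst.length : Int) 1 = l
  induction l with
  | nil => rfl
  | cons i t ih =>
    simp only [List.filterMap_cons, List.map_cons, List.filter_cons]
    by_cases h : 2 ≤ PySem.List.pyGetD lst i 0
    · rw [if_pos h, ih]; simp [h]
    · rw [if_neg h, ih]; simp [h]

-- ===== VERDICT (by name: the statement is the Claim_ definition above) =====
theorem distribute_k_spec : Claim_equal_distribute_k := by
  intro lst k _
  unfold Spec_distribute_k distribute_k distribute_k_alt
  simp only []
  rw [pvElig_eq]
  set pairs := (PySem.List.enumerate lst 0).filter (fun p => decide (2 ≤ p.2)) with hpairs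
  set spairs := PySem.List.sorted pairs (fun x => x.2) true with hsp
  have hall : ∀ i ∈ spairs.map (fun p => p.1), 0 ≤ i := by
    intro i hi
    rcases List.mem_map.mp hi with ⟨p, hp, rfl⟩
    have hp' : p ∈ pairs := (PySem.List.mem_sorted _ _ _ _).mp hp
    have hp'' : p ∈ PySem.List.enumerate lst 0 := List.mem_of_mem_filter hp'
    rcases (PySem.List.mem_enumerate_iff _ _ _).mp hp'' with ⟨kk, hkk, rfl⟩
    omega
  by_cases hg : 0 < k ∧ 0 < spairs.length
  · rw [if_pos hg]
    have hne : spairs.map (fun p => p.1) ≠ [] := by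
      intro h; rw [List.map_eq_nil_iff] at h; simp [h] at hg
    rw [pvLoopA_eq k.toNat k lst _ rfl (by omega) hne hall, pvBfold, sub_zero,
        List.length_map]
  · rw [if_neg hg, pvLoopA, dif_neg]
    intro ⟨h1, h2⟩
    exact hg ⟨h1, List.length_pos_iff.mpr fun he => h2 (by rw [he]; rfl)⟩
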